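-- pv_equiv track=rewrite | github.com/VaninaBlas/Guias | Practicas td1/recursion_parcial.py | contar_coincidencias
-- ===== SOURCE A (Python) =====
-- def contar_coincidencias(xs:list[int])->int:
--     """
--     Requiere: nada
--     Devuelve: cuantas veces es cierto que la i-eisma posicion tiene el numero i
--     """
--     i=len(xs)-1
--
--     if(len(xs)==0):
--         return 0
--     else:
--         if(xs[i]==i):
--
--             return 1+contar_coincidencias(xs[:i])
--         else:
--             return contar_coincidencias(xs[:i])
-- ===== SOURCE B (Python) =====
-- def contar_coincidencias(xs: list[int]) -> int:
--     total = 0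
--     for i, x in enumerate(xs):
--         if x == i:
--             total += 1
--     return total
-- ===== Notes on version B (the rewrite author's own statement) =====
-- stated objective: faster
-- what changed: Replaces back-to-front recursion with O(n^2) slice copies by a single forward iterative pass with a counter.
import Mathlib
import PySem

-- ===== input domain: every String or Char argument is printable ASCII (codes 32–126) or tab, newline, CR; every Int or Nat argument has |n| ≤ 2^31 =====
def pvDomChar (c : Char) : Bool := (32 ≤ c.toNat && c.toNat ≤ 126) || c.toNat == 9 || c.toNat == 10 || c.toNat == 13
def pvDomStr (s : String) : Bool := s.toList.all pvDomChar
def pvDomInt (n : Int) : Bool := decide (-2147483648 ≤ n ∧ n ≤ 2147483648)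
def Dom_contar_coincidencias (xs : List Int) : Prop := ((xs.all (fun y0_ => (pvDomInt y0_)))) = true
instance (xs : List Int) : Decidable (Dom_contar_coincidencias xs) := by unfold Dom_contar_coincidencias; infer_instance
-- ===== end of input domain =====

-- B replaces A's back-to-front recursion (with a slice copy per call) by one forward pass with a counter.

-- ===== PORT A =====
-- literal transliteration: i = len(xs)-1; empty → 0; else recurse on xs[:i], adding 1 if xs[i]==i
def contar_coincidencias (xs : List Int) : Int :=
  let i : Int := (xs.length : Int) - 1
  if xs.length = 0 then 0
  else
    if PySem.List.pyGet? xs i = some i then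
      1 + contar_coincidencias (PySem.List.slice xs none (some i))
    else
      contar_coincidencias (PySem.List.slice xs none (some i))
termination_by xs.length
decreasing_by
  all_goals
    rename_i h _
    have hx : ((xs.length : Int) - 1) = ((xs.length - 1 : Nat) : Int) := by
      omega
    rw [hx, PySem.List.slice_to_natCast, List.length_take]
    omega

-- ===== PORT B =====
-- literal transliteration of Source B: total = 0; for i, x in enumerate(xs): if x == i: total += 1
def contar_coincidencias_alt (xs : List Int) : Int :=
  (PySem.List.enumerate xs 0).foldl
    (fun total p => if p.2 = p.1 then total + 1 else total) 0

-- ===== PRECONDITION & SPEC =====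
def Spec_contar_coincidencias (xs : List Int) (out : Int) : Prop := out = contar_coincidencias_alt xs
instance (xs : List Int) (out : Int) : Decidable (Spec_contar_coincidencias xs out) := by unfold Spec_contar_coincidencias; infer_instance

-- ===== CLAIM (what is proved, stated in full; the proofs are below) =====
def Claim_equal_contar_coincidencias : Prop := ∀ (xs : List Int), Dom_contar_coincidencias xs → Spec_contar_coincidencias xs (contar_coincidencias xs)

-- ===== LEMMAS AND PROOFS =====

-- the count of matching positions, as a sum over the enumeration starting at s
def specSum (xs : List Int) (s : Int) : Int :=
  ((PySem.List.enumerate xs s).map (fun p => if p.2 = p.1 then (1 : Int) else 0)).sum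

theorem foldl_eq_specSum (xs : List Int) : ∀ (s acc : Int),
    (PySem.List.enumerate xs s).foldl
      (fun total p => if p.2 = p.1 then total + 1 else total) acc = acc + specSum xs s := by
  induction xs with
  | nil => intro s acc; simp [specSum, PySem.List.enumerate_nil]
  | cons x t ih =>
      intro s acc
      rw [PySem.List.enumerate_cons]
      simp only [List.foldl_cons, specSum, PySem.List.enumerate_cons, List.map_cons,
        List.sum_cons]
      rw [ih]
      by_cases h : x = s <;> simp [h, specSum] <;> ring_nf

theorem alt_eq_specSum (xs : List Int) : contar_coincidencias_alt xs = specSum xs 0 := by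
  unfold contar_coincidencias_alt
  rw [foldl_eq_specSum]
  ring

theorem specSum_append_singleton (t : List Int) (a s : Int) :
    specSum (t ++ [a]) s = specSum t s + (if a = s + t.length then 1 else 0) := by
  unfold specSum
  rw [PySem.List.enumerate_append]
  simp [PySem.List.enumerate_cons, PySem.List.enumerate_nil]

theorem A_eq_specSum (xs : List Int) : contar_coincidencias xs = specSum xs 0 := by
  induction xs using List.reverseRecOn with
  | nil => simp [contar_coincidencias, specSum, PySem.List.enumerate_nil]
  | append_singleton t a ih =>
      rw [contar_coincidencias]
      have hlen : (t ++ [a]).length = t.length + 1 := by simp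
      have hslice : PySem.List.slice (t ++ [a]) none (some ((t.length : Nat) : Int)) = t := by
        rw [PySem.List.slice_to_natCast]
        simp
      rw [specSum_append_singleton]
      by_cases h : a = (t.length : Int) <;> simp [hslice, hlen, h, ih] <;> ring_nf

-- ===== VERDICT (by name: the statement is the Claim_ definition above) =====
theorem contar_coincidencias_spec : Claim_equal_contar_coincidencias := by
  intro xs _
  unfold Spec_contar_coincidencias
  rw [alt_eq_specSum, A_eq_specSum]
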